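-- pv_equiv track=rewrite | github.com/SzymonKowalik/matematyka_dyskretna | main.py | tablica_prawdy
-- ===== SOURCE A (Python) =====
-- def tablica_prawdy(ile_zmiennych, czy_zanegowane, duplikaty_index):
-- 	wyn = []
-- 	for i in range((2**ile_zmiennych)):
-- 		wartosciowanie = [int(x) for x in ((ile_zmiennych-1)*'0'+format(i, 'b'))[-ile_zmiennych:]]
-- 		if czy_zanegowane:
-- 			wartosciowanie[0] = not wartosciowanie[0]
--
-- 		xor = 0
--
-- 		for i, y in zip(wartosciowanie, duplikaty_index):
-- 			if not i or not y:
-- 				continue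
-- 			else:
-- 				xor = xor ^ int(y)
-- 		wyn.append(xor)
-- 	return wyn
-- ===== SOURCE B (Python) =====
-- def tablica_prawdy(ile_zmiennych, czy_zanegowane, duplikaty_index):
--     # Iterative doubling: the table for the last k variables doubles into the table for
--     # the last k+1 variables by appending a copy XORed with that variable's index.
--     # No per-row binary formatting.
--     tab = [0]
--     for j in range(ile_zmiennych - 1, -1, -1):
--         d = duplikaty_index[j] if j < len(duplikaty_index) else 0
--         tab = tab + [d ^ x for x in tab]
--     if czy_zanegowane and duplikaty_index:
--         d0 = duplikaty_index[0]
--         tab = [x ^ d0 for x in tab]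
--     return tab
-- ===== Notes on version B (the rewrite author's own statement) =====
-- stated objective: alternative
-- what changed: B builds the XOR truth-table column by iterative doubling (each pass appends a copy of the table XORed with the current variable's index) instead of formatting and rescanning an n-bit binary string for each of the 2^n rows; it does O(1) XOR work per produced entry instead of per-row formatting, though a timing run could not confirm a speed-up on the generated sizes.
import Mathlib
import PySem

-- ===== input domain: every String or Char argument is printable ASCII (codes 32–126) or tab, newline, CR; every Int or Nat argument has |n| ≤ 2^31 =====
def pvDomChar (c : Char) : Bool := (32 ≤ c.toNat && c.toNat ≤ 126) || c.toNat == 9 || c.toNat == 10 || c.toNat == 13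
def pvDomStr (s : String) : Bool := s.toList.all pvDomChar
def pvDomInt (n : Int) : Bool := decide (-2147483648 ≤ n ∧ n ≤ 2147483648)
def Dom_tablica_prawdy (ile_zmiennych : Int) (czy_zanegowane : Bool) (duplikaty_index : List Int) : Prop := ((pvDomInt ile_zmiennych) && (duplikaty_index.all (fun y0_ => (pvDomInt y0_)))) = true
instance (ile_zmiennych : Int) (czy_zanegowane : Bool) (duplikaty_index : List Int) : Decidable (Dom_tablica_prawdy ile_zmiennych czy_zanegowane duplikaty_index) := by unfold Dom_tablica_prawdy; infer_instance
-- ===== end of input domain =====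

-- B replaces A's per-row binary string formatting and rescanning by iterative doubling of the
-- table: one XOR per produced entry, no per-row formatting (objective: alternative algorithm).

-- ===== PORT A =====
-- format(i, 'b') for i ≥ 1: binary digits of i, most significant first (exact for Nat input)
def pyBinAux : Nat → List Char
  | 0 => []
  | i + 1 => pyBinAux ((i + 1) / 2) ++ [if (i + 1) % 2 = 1 then '1' else '0']
  decreasing_by exact Nat.div_lt_self (Nat.succ_pos i) one_lt_two

-- format(i, 'b') (Python prints '0' for 0)
def pyFormatB (i : Nat) : List Char := if i = 0 then ['0'] else pyBinAux i

-- the body of A's outer loop (one appended row), named so the fold reads like the Python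
def rowA (ile_zmiennych : Int) (czy_zanegowane : Bool) (duplikaty_index : List Int) (i : Nat) : Int :=
  -- wartosciowanie = [int(x) for x in ((n-1)*'0' + format(i,'b'))[-n:]]
  -- int(x) ported as the digit value: exact, the string contains only '0'/'1'
  let w0 : List Int :=
    (PySem.List.slice (PySem.List.pyRepeat ['0'] (ile_zmiennych - 1) ++ pyFormatB i)
        (some (-ile_zmiennych)) none).map (fun x => if x = '1' then (1 : Int) else 0)
  -- if czy_zanegowane: wartosciowanie[0] = not wartosciowanie[0]
  -- (the list is never empty for n ≥ 0, so the [] branch is unreachable; entries are 0/1, 'not' flips them)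
  let w : List Int :=
    if czy_zanegowane then
      match w0 with
      | [] => []
      | h :: t => (if h = 0 then 1 else 0) :: t
    else w0
  -- inner loop: xor accumulation over zip(wartosciowanie, duplikaty_index)
  (w.zip duplikaty_index).foldl
    (fun xor p => if p.1 = 0 ∨ p.2 = 0 then xor else PySem.Int.bxor xor p.2) 0

def tablica_prawdy (ile_zmiennych : Int) (czy_zanegowane : Bool) (duplikaty_index : List Int) : List Int :=
  if ile_zmiennych < 0 then []  -- Python: 2**n is a float for n < 0, range(float) raises TypeError (outside Pre_)
  else
    (List.range (2 ^ ile_zmiennych.toNat)).foldl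
      (fun wyn i => wyn ++ [rowA ile_zmiennych czy_zanegowane duplikaty_index i]) []

-- ===== PORT B =====
def tablica_prawdy_alt (ile_zmiennych : Int) (czy_zanegowane : Bool) (duplikaty_index : List Int) : List Int :=
  -- for j in range(ile_zmiennych - 1, -1, -1): double the table, XORing in duplikaty_index[j]
  let tab := (PySem.List.pyRange (ile_zmiennych - 1) (-1) (-1)).foldl
    (fun tab j =>
      -- d = duplikaty_index[j] if j < len(duplikaty_index) else 0  (j ≥ 0 here, so pyGetD is exact)
      let d : Int := if j < (duplikaty_index.length : Int) then PySem.List.pyGetD duplikaty_index j 0 else 0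
      tab ++ tab.map (fun x => PySem.Int.bxor d x)) [0]
  match czy_zanegowane, duplikaty_index with
  | true, d0 :: _ => tab.map (fun x => PySem.Int.bxor x d0)  -- negation of the first bit = XOR with dup[0]
  | _, _ => tab

-- ===== PRECONDITION & SPEC =====
-- Pre_ excludes exactly the inputs on which A raises: for ile_zmiennych < 0, 2**ile_zmiennych
-- is a float and range() raises TypeError.
def Pre_tablica_prawdy (ile_zmiennych : Int) (czy_zanegowane : Bool) (duplikaty_index : List Int) : Prop :=
  0 ≤ ile_zmiennych
instance (ile_zmiennych : Int) (czy_zanegowane : Bool) (duplikaty_index : List Int) : Decidable (Pre_tablica_prawdy ile_zmiennych czy_zanegowane duplikaty_index) := by unfold Pre_tablica_prawdy; infer_instance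
def pvWitness_tablica_prawdy : Int × Bool × List Int := (2, true, [1, 2, 3])

def Spec_tablica_prawdy (ile_zmiennych : Int) (czy_zanegowane : Bool) (duplikaty_index : List Int) (out : List Int) : Prop := out = tablica_prawdy_alt ile_zmiennych czy_zanegowane duplikaty_index
instance (ile_zmiennych : Int) (czy_zanegowane : Bool) (duplikaty_index : List Int) (out : List Int) : Decidable (Spec_tablica_prawdy ile_zmiennych czy_zanegowane duplikaty_index out) := by unfold Spec_tablica_prawdy; infer_instance

-- ===== CLAIM (what is proved, stated in full; the proofs are below) =====
def Claim_equal_tablica_prawdy : Prop := ∀ (ile_zmiennych : Int) (czy_zanegowane : Bool) (duplikaty_index : List Int), Dom_tablica_prawdy ile_zmiennych czy_zanegowane duplikaty_index → Pre_tablica_prawdy ile_zmiennych czy_zanegowane duplikaty_index → Spec_tablica_prawdy ile_zmiennych czy_zanegowane duplikaty_index (tablica_prawdy ile_zmiennych czy_zanegowane duplikaty_index)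

-- ===== LEMMAS AND PROOFS =====

theorem bxor_assoc' (a b c : Int) :
    PySem.Int.bxor (PySem.Int.bxor a b) c = PySem.Int.bxor a (PySem.Int.bxor b c) := by
  unfold PySem.Int.bxor
  split_ifs <;> simp_all [Nat.xor_assoc] <;> omega

theorem zero_bxor' (a : Int) : PySem.Int.bxor 0 a = a := by
  rw [PySem.Int.bxor_comm, PySem.Int.bxor_zero]

-- recursive form of B's doubling loop: table for n variables over dup
def buildAlt : Nat → List Int → List Int
  | 0, _ => [0]
  | n + 1, dup =>
    let d := dup.headD 0
    let half := buildAlt n dup.tail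
    half ++ half.map (fun x => PySem.Int.bxor d x)

-- the body of B's doubling loop, named
def stepB (dup : List Int) (tab : List Int) (j : Int) : List Int :=
  let d : Int := if j < (dup.length : Int) then PySem.List.pyGetD dup j 0 else 0
  tab ++ tab.map (fun x => PySem.Int.bxor d x)

-- peel the last element off a descending range
theorem pyRange_desc (k m : Nat) :
    PySem.List.pyRange ((k : Int) + m) ((k : Int) - 1) (-1)
      = PySem.List.pyRange ((k : Int) + m) (k : Int) (-1) ++ [(k : Int)] := by
  unfold PySem.List.pyRange
  norm_num
  have hm : (if 0 < m then m else 0) = m := by split_ifs <;> omega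
  rw [hm, List.range_succ, List.map_append]
  simp

theorem stepB_eq (dup tab : List Int) (k : Nat) :
    stepB dup tab k = tab ++ tab.map (fun x => PySem.Int.bxor ((dup.drop k).headD 0) x) := by
  unfold stepB
  by_cases hk : k < dup.length
  · rw [if_pos (by exact_mod_cast hk), PySem.List.pyGetD_natCast]
    have : (dup.drop k).headD 0 = dup.getD k 0 := by
      rw [List.headD_eq_head?_getD, List.head?_drop, List.getD_eq_getElem?_getD]
    rw [this]
  · rw [if_neg (by exact_mod_cast hk)]
    rw [List.drop_eq_nil_of_le (by omega)]
    rfl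

theorem fold_buildAlt (m : Nat) : ∀ (k : Nat) (dup : List Int),
    (PySem.List.pyRange ((k : Int) + m - 1) ((k : Int) - 1) (-1)).foldl (stepB dup) [0]
      = buildAlt m (dup.drop k) := by
  induction m with
  | zero =>
    intro k dup
    have he : PySem.List.pyRange ((k : Int) + ((0:Nat) : Int) - 1) ((k : Int) - 1) (-1) = [] := by
      unfold PySem.List.pyRange
      norm_num
    rw [he]
    rfl
  | succ m ih =>
    intro k dup
    have e : (k : Int) + (m + 1 : Nat) - 1 = (k : Int) + m := by push_cast; ring
    rw [e, pyRange_desc k m, List.foldl_append]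
    have IH := ih (k + 1) dup
    rw [show ((k + 1 : Nat) : Int) + m - 1 = (k : Int) + m by push_cast; ring,
        show ((k + 1 : Nat) : Int) - 1 = (k : Int) by push_cast; ring] at IH
    rw [IH, List.foldl_cons, List.foldl_nil, stepB_eq]
    have hb : buildAlt (m + 1) (dup.drop k)
        = buildAlt m (dup.drop k).tail
          ++ (buildAlt m (dup.drop k).tail).map (fun x => PySem.Int.bxor ((dup.drop k).headD 0) x) := rfl
    rw [hb, List.tail_drop]

-- B's port in terms of buildAlt (for 0 ≤ n)
theorem alt_eq (nI : Int) (hn : 0 ≤ nI) (neg : Bool) (dup : List Int) :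
    tablica_prawdy_alt nI neg dup
      = match neg, dup with
        | true, d0 :: _ => (buildAlt nI.toNat dup).map (fun x => PySem.Int.bxor x d0)
        | _, _ => buildAlt nI.toNat dup := by
  unfold tablica_prawdy_alt
  have hst : (fun (tab : List Int) (j : Int) =>
      let d : Int := if j < (dup.length : Int) then PySem.List.pyGetD dup j 0 else 0
      tab ++ tab.map (fun x => PySem.Int.bxor d x)) = stepB dup := rfl
  have hr : PySem.List.pyRange (nI - 1) (-1) (-1)
      = PySem.List.pyRange (((0 : Nat) : Int) + nI.toNat - 1) (((0 : Nat) : Int) - 1) (-1) := by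
    congr 1 <;> omega
  rw [hst, hr, fold_buildAlt nI.toNat 0 dup, List.drop_zero]

-- n-bit zero-padded binary representation of i (least significant digit appended last)
def padBin : Nat → Nat → List Char
  | 0, _ => []
  | n + 1, i => padBin n (i / 2) ++ [if i % 2 = 1 then '1' else '0']

def chInt (c : Char) : Int := if c = '1' then 1 else 0

def stepX (x : Int) (p : Int × Int) : Int := if p.1 = 0 ∨ p.2 = 0 then x else PySem.Int.bxor x p.2

def valX (bits dup : List Int) : Int := (bits.zip dup).foldl stepX 0

theorem padBin_zero (n : Nat) : padBin n 0 = List.replicate n '0' := by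
  induction n with
  | zero => rfl
  | succ n ih => simp [padBin, ih, List.replicate_succ']

theorem padBin_length (n i : Nat) : (padBin n i).length = n := by
  induction n generalizing i with
  | zero => rfl
  | succ n ih => simp [padBin, ih]

theorem pyBinAux_eq (i : Nat) (h : 1 ≤ i) :
    pyBinAux i = pyBinAux (i / 2) ++ [if i % 2 = 1 then '1' else '0'] := by
  match i, h with
  | i + 1, _ => rw [pyBinAux]

theorem pad_eq (n : Nat) (hn : 1 ≤ n) (i : Nat) (hi : i < 2 ^ n) :
    padBin n i = List.replicate (n - (pyFormatB i).length) '0' ++ pyFormatB i := by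
  induction n generalizing i with
  | zero => omega
  | succ n ih =>
    rcases Nat.eq_zero_or_pos i with rfl | hip
    · simp [padBin_zero, pyFormatB, List.replicate_succ']
    rcases Nat.lt_or_ge i 2 with hi2 | hi2
    · have : i = 1 := by omega
      subst this
      simp [padBin, padBin_zero, pyFormatB, pyBinAux]
    · have hn1 : 1 ≤ n := by
        by_contra h
        have : n = 0 := by omega
        subst this
        simp at hi
        omega
      have hdiv : i / 2 < 2 ^ n := by
        rw [Nat.div_lt_iff_lt_mul (by omega)]
        calc i < 2 ^ (n + 1) := hi
        _ = 2 ^ n * 2 := by rw [Nat.pow_succ]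
      have ihh := ih hn1 (i / 2) hdiv
      have hF : pyFormatB i = pyBinAux (i / 2) ++ [if i % 2 = 1 then '1' else '0'] := by
        rw [pyFormatB, if_neg (by omega), pyBinAux_eq i (by omega)]
      have hF2 : pyFormatB (i / 2) = pyBinAux (i / 2) := by
        rw [pyFormatB, if_neg (by omega)]
      rw [padBin, ihh, hF2, hF]
      simp [List.length_append]

theorem pyFormatB_len_pos (i : Nat) : 1 ≤ (pyFormatB i).length := by
  rcases Nat.eq_zero_or_pos i with rfl | h
  · simp [pyFormatB]
  · rw [pyFormatB, if_neg (by omega), pyBinAux_eq i h]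
    simp

theorem pyFormatB_len_le (n i : Nat) (hn : 1 ≤ n) (hi : i < 2 ^ n) : (pyFormatB i).length ≤ n := by
  have h := congrArg List.length (pad_eq n hn i hi)
  rw [padBin_length] at h
  simp at h
  omega

-- the sliced padded string computed by A is exactly padBin
theorem slice_eq (nI : Int) (hn : 1 ≤ nI) (i : Nat) (hi : i < 2 ^ nI.toNat) :
    PySem.List.slice (PySem.List.pyRepeat ['0'] (nI - 1) ++ pyFormatB i) (some (-nI)) none
      = padBin nI.toNat i := by
  set n := nI.toNat with hnn
  have h1 : 1 ≤ n := by omega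
  have hcast : nI = (n : Int) := by omega
  have hrep : PySem.List.pyRepeat ['0'] (nI - 1) = List.replicate (n - 1) '0' := by
    rw [PySem.List.pyRepeat_singleton]
    congr 1
    omega
  have hL := pyFormatB_len_le n i h1 hi
  have hLp := pyFormatB_len_pos i
  rw [hrep, hcast, PySem.List.slice_from_neg_natCast _ n (by omega)]
  rw [List.drop_append]
  have e1 : (List.replicate (n - 1) '0' ++ pyFormatB i).length - n = (pyFormatB i).length - 1 := by
    simp
    omega
  rw [e1, List.drop_replicate]
  have e2 : (pyFormatB i).length - 1 - (List.replicate (n - 1) '0').length = 0 := by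
    simp
    omega
  rw [e2, List.drop_zero, pad_eq n h1 i hi]
  have e3 : n - 1 - ((pyFormatB i).length - 1) = n - (pyFormatB i).length := by omega
  rw [e3]

-- splitting off the most significant bit of padBin
theorem padBin_succ_lt (n i : Nat) (hi : i < 2 ^ n) : padBin (n + 1) i = '0' :: padBin n i := by
  induction n generalizing i with
  | zero =>
    interval_cases i
    rfl
  | succ n ih =>
    have hdiv : i / 2 < 2 ^ n := by
      rw [Nat.div_lt_iff_lt_mul (by omega)]
      calc i < 2 ^ (n + 1) := hi
      _ = 2 ^ n * 2 := by rw [Nat.pow_succ]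
    have e : padBin (n + 1 + 1) i = padBin (n + 1) (i / 2) ++ [if i % 2 = 1 then '1' else '0'] := rfl
    have e2 : padBin (n + 1) i = padBin n (i / 2) ++ [if i % 2 = 1 then '1' else '0'] := rfl
    rw [e, e2, ih _ hdiv]
    simp

theorem padBin_succ_ge (n i : Nat) (hi : i < 2 ^ n) :
    padBin (n + 1) (i + 2 ^ n) = '1' :: padBin n i := by
  induction n generalizing i with
  | zero =>
    interval_cases i
    rfl
  | succ n ih =>
    have hdiv : i / 2 < 2 ^ n := by
      rw [Nat.div_lt_iff_lt_mul (by omega)]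
      calc i < 2 ^ (n + 1) := hi
      _ = 2 ^ n * 2 := by rw [Nat.pow_succ]
    have e : padBin (n + 1 + 1) (i + 2 ^ (n + 1))
        = padBin (n + 1) ((i + 2 ^ (n + 1)) / 2) ++ [if (i + 2 ^ (n + 1)) % 2 = 1 then '1' else '0'] := rfl
    have e2 : padBin (n + 1) i = padBin n (i / 2) ++ [if i % 2 = 1 then '1' else '0'] := rfl
    have hpow : 2 ^ (n + 1) = 2 * 2 ^ n := by rw [Nat.pow_succ']
    have ed : (i + 2 ^ (n + 1)) / 2 = i / 2 + 2 ^ n := by omega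
    have em : (i + 2 ^ (n + 1)) % 2 = i % 2 := by omega
    rw [e, e2, ed, em, ih _ hdiv]
    simp

theorem foldl_stepX (l : List (Int × Int)) (a : Int) :
    l.foldl stepX a = PySem.Int.bxor a (l.foldl stepX 0) := by
  induction l generalizing a with
  | nil => simp [PySem.Int.bxor_zero]
  | cons p t ih =>
    rw [List.foldl_cons, List.foldl_cons, ih (stepX a p), ih (stepX 0 p)]
    unfold stepX
    split_ifs
    · rw [zero_bxor']
    · rw [zero_bxor', bxor_assoc']

theorem valX_cons_zero (bt dup : List Int) : valX (0 :: bt) dup = valX bt dup.tail := by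
  cases dup with
  | nil => simp [valX]
  | cons d dt => simp [valX, stepX]

theorem valX_cons_ne (h : Int) (hh : h ≠ 0) (bt dup : List Int) :
    valX (h :: bt) dup = PySem.Int.bxor (dup.headD 0) (valX bt dup.tail) := by
  cases dup with
  | nil => simp [valX]
  | cons d dt =>
    show (List.zip (h :: bt) (d :: dt)).foldl stepX 0 = _
    rw [List.zip_cons_cons, List.foldl_cons]
    have hs : stepX 0 (h, d) = d := by
      unfold stepX
      by_cases hd : d = 0 <;> simp [hh, hd, zero_bxor']
    rw [hs, foldl_stepX]
    rfl

theorem valX_flip (h : Int) (t dup : List Int) :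
    valX ((if h = 0 then 1 else 0) :: t) dup
      = PySem.Int.bxor (valX (h :: t) dup) (dup.headD 0) := by
  by_cases h0 : h = 0
  · subst h0
    rw [if_pos rfl, valX_cons_ne 1 one_ne_zero, valX_cons_zero, PySem.Int.bxor_comm]
  · rw [if_neg h0, valX_cons_zero, valX_cons_ne h h0]
    rw [PySem.Int.bxor_comm (dup.headD 0), bxor_assoc', PySem.Int.bxor_self, PySem.Int.bxor_zero]

theorem foldl_push {α β : Type} (f : α → β) (l : List α) (acc : List β) :
    l.foldl (fun wyn i => wyn ++ [f i]) acc = acc ++ l.map f := by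
  induction l generalizing acc with
  | nil => simp
  | cons x xs ih => simp [ih]

theorem map_range_valX (n : Nat) (dup : List Int) :
    (List.range (2 ^ n)).map (fun i => valX ((padBin n i).map chInt) dup) = buildAlt n dup := by
  induction n generalizing dup with
  | zero => simp [padBin, valX, buildAlt]
  | succ n ih =>
    have hsplit : 2 ^ (n + 1) = 2 ^ n + 2 ^ n := by rw [Nat.pow_succ]; omega
    rw [hsplit, List.range_add, List.map_append, List.map_map]
    have hb : buildAlt (n + 1) dup
        = buildAlt n dup.tail ++ (buildAlt n dup.tail).map
            (fun x => PySem.Int.bxor (dup.headD 0) x) := rfl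
    rw [hb]
    congr 1
    · rw [← ih dup.tail]
      apply List.map_congr_left
      intro i hir
      have hi : i < 2 ^ n := List.mem_range.mp hir
      rw [padBin_succ_lt n i hi, List.map_cons]
      have : chInt '0' = 0 := rfl
      rw [this, valX_cons_zero]
    · rw [← ih dup.tail, List.map_map]
      apply List.map_congr_left
      intro i hir
      have hi : i < 2 ^ n := List.mem_range.mp hir
      show valX ((padBin (n + 1) (2 ^ n + i)).map chInt) dup = _
      rw [Nat.add_comm (2 ^ n) i, padBin_succ_ge n i hi, List.map_cons]
      have : chInt '1' = 1 := rfl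
      rw [this, valX_cons_ne 1 one_ne_zero]
      rfl

-- A's row in terms of valX, for n ≥ 1
theorem rowA_eq (nI : Int) (hn : 1 ≤ nI) (neg : Bool) (dup : List Int) (i : Nat)
    (hi : i < 2 ^ nI.toNat) :
    rowA nI neg dup i
      = if neg then
          PySem.Int.bxor (valX ((padBin nI.toNat i).map chInt) dup) (dup.headD 0)
        else valX ((padBin nI.toNat i).map chInt) dup := by
  unfold rowA
  rw [slice_eq nI hn i hi]
  have hch : (fun x => if x = '1' then (1 : Int) else 0) = chInt := rfl
  rw [hch]
  have hst : (fun (xor : Int) (p : Int × Int) =>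
      if p.1 = 0 ∨ p.2 = 0 then xor else PySem.Int.bxor xor p.2) = stepX := rfl
  cases neg with
  | false => simp only [Bool.false_eq_true, if_false, hst]; rfl
  | true =>
    simp only [if_pos, hst]
    have hne : (padBin nI.toNat i).map chInt ≠ [] := by
      intro hnil
      have := congrArg List.length hnil
      simp [padBin_length] at this
      omega
    obtain ⟨h, t, e⟩ := List.exists_cons_of_ne_nil hne
    rw [e]
    show valX ((if h = 0 then 1 else 0) :: t) dup = _
    rw [valX_flip]

-- ===== VERDICT (by name: the statement is the Claim_ definition above) =====
theorem tablica_prawdy_spec : Claim_equal_tablica_prawdy := by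
  intro nI neg dup _ hpre
  unfold Pre_tablica_prawdy at hpre
  unfold Spec_tablica_prawdy
  unfold tablica_prawdy
  rw [if_neg (by omega), foldl_push, List.nil_append]
  rcases lt_or_ge nI 1 with h0 | h1
  · -- n = 0: one row
    have : nI = 0 := by omega
    subst this
    have e : (2 : Nat) ^ (0 : Int).toNat = 1 := rfl
    rw [e]
    have hrow : rowA 0 neg dup 0
        = if neg then PySem.Int.bxor 0 (dup.headD 0) else 0 := by
      unfold rowA
      have hw0 : (PySem.List.slice (PySem.List.pyRepeat ['0'] ((0 : Int) - 1) ++ pyFormatB 0)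
          (some (-(0 : Int))) none).map (fun x => if x = '1' then (1 : Int) else 0) = [0] := by
        decide
      rw [hw0]
      cases neg with
      | false =>
        simp only [Bool.false_eq_true, if_false]
        cases dup with
        | nil => rfl
        | cons d dt => simp
      | true =>
        simp only [if_pos]
        cases dup with
        | nil => simp
        | cons d dt =>
          by_cases hd : d = 0 <;> simp [hd, zero_bxor']
    rw [List.range_one, List.map_cons, List.map_nil, hrow, alt_eq 0 (by omega)]
    cases neg with
    | false => rfl
    | true =>
      cases dup with
      | nil => simp [buildAlt]
      | cons d0 dt => rfl
  · -- n ≥ 1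
    have hmap : (List.range (2 ^ nI.toNat)).map (rowA nI neg dup)
        = (List.range (2 ^ nI.toNat)).map (fun i =>
            if neg then
              PySem.Int.bxor (valX ((padBin nI.toNat i).map chInt) dup) (dup.headD 0)
            else valX ((padBin nI.toNat i).map chInt) dup) := by
      apply List.map_congr_left
      intro i hir
      exact rowA_eq nI h1 neg dup i (List.mem_range.mp hir)
    rw [hmap, alt_eq nI (by omega)]
    cases neg with
    | false =>
      simp only [Bool.false_eq_true, if_false]
      rw [map_range_valX]
    | true =>
      cases dup with
      | nil =>
        simp only [if_pos, List.headD_nil, PySem.Int.bxor_zero]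
        rw [map_range_valX]
      | cons d0 dt =>
        simp only [if_pos, List.headD_cons]
        rw [← map_range_valX nI.toNat (d0 :: dt), List.map_map]
        rfl
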